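-- pv_equiv track=rewrite | github.com/joannewolf/code_problems | codility/20230128_Year_of_the_Rabbit.py | solution
-- ===== SOURCE A (Python) =====
-- def solution(A, B):
--     # Implement your solution here
--     N = len(A)
--     for n in range(N): # shift n times
--         all_pass = True
--         for i in range(N):
--             if A[i] == B[(i - n + N) % N]:
--                 all_pass = False
--                 break
--
--         if all_pass:
--             return n
--
--     return -1
-- ===== SOURCE B (Python) =====
-- def solution(A, B):
--     N = len(A)
--     # index B's first N values once: value -> list of positions
--     pos = {}
--     for j, b in enumerate(B[:N]):
--         pos.setdefault(b, []).append(j)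
--     # mark every shift n that has some matching pair A[i] == B[(i-n) % N]
--     bad = [False] * N
--     for i, a in enumerate(A):
--         for j in pos.get(a, []):
--             bad[(i - j) % N] = True
--     for n in range(N):
--         if not bad[n]:
--             return n
--     return -1
-- ===== Notes on version B (the rewrite author's own statement) =====
-- stated objective: alternative
-- what changed: Replaces A's per-shift rescan (restarting the inner comparison loop for every candidate shift) with a hash index of B's positions by value, a single marking pass that flags the bad shift (i-j)%N of every matching pair into a boolean table, and one final scan for the first unmarked shift.
import Mathlib
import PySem

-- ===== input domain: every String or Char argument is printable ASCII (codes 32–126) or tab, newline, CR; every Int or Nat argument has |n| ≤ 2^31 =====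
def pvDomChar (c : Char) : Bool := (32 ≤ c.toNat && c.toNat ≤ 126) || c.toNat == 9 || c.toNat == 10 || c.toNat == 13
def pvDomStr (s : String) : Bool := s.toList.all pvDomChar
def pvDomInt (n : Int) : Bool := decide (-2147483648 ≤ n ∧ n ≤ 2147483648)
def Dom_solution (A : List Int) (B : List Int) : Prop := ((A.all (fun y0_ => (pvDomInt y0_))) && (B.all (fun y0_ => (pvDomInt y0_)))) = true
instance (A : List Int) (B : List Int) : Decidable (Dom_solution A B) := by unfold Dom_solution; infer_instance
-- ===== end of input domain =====

-- B replaces A's per-shift rescans by one hash index of B's positions, one marking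
-- pass flagging the bad shift of every matching pair, and a scan for the first
-- unmarked shift (objective: alternative algorithm, same worst-case cost).

-- ===== PORT A =====
-- inner 'for i in range(N)' loop: returns the final value of all_pass (break → False)
def pvA_inner (A B : List Int) (N n : Int) : List Int → Bool
  | [] => true
  | i :: rest =>
    if PySem.List.pyGetD A i 0 = PySem.List.pyGetD B (PySem.Int.mod (i - n + N) N) 0 then false
    else pvA_inner A B N n rest

-- outer 'for n in range(N)' loop with its early return
def pvA_outer (A B : List Int) (N : Int) : List Int → Int
  | [] => -1
  | n :: rest =>
    if pvA_inner A B N n (PySem.List.pyRange 0 N 1) then n else pvA_outer A B N rest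

def solution (A : List Int) (B : List Int) : Int :=
  pvA_outer A B (A.length : Int) (PySem.List.pyRange 0 (A.length : Int) 1)

-- ===== PORT B =====
-- pos = {}; for j, b in enumerate(B[:N]): pos.setdefault(b, []).append(j)
def pvB_pos (B : List Int) (N : Int) : PySem.Dict Int (List Int) :=
  (PySem.List.enumerate (PySem.List.slice B none (some N)) 0).foldl
    (fun d p => PySem.Dict.modify d p.2 [] (fun l => l ++ [p.1])) PySem.Dict.empty

-- bad = [False]*N; for i, a in enumerate(A): for j in pos.get(a, []): bad[(i-j)%N] = True
-- ((i-j)%N is in [0,N), so the pySetD index is nonnegative and in range)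
def pvB_bad (A B : List Int) (N : Int) : List Bool :=
  (PySem.List.enumerate A 0).foldl
    (fun bd p =>
      (PySem.Dict.getD (pvB_pos B N) p.2 []).foldl
        (fun b2 j => PySem.List.pySetD b2 (PySem.Int.mod (p.1 - j) N) true) bd)
    (List.replicate N.toNat false)

-- for n in range(N): if not bad[n]: return n;  return -1
def pvB_scan (bad : List Bool) : List Int → Int
  | [] => -1
  | n :: rest => if !(PySem.List.pyGetD bad n false) then n else pvB_scan bad rest

def solution_alt (A : List Int) (B : List Int) : Int :=
  pvB_scan (pvB_bad A B (A.length : Int)) (PySem.List.pyRange 0 (A.length : Int) 1)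

-- ===== PRECONDITION & SPEC =====
-- Pre_ excludes exactly the inputs where Python A raises IndexError: when B is
-- shorter than A, A indexes B[(i-n+N)%N] out of range (for N ≥ 1 this is always reached).
def Pre_solution (A : List Int) (B : List Int) : Prop := A.length ≤ B.length
instance (A : List Int) (B : List Int) : Decidable (Pre_solution A B) := by
  unfold Pre_solution; infer_instance

def pvWitness_solution : List Int × List Int := ([1, 2], [3, 4])

def Spec_solution (A : List Int) (B : List Int) (out : Int) : Prop := out = solution_alt A B
instance (A : List Int) (B : List Int) (out : Int) : Decidable (Spec_solution A B out) := by
  unfold Spec_solution; infer_instance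

-- ===== CLAIM (what is proved, stated in full; the proofs are below) =====
def Claim_equal_solution : Prop :=
  ∀ (A : List Int) (B : List Int), Dom_solution A B → Pre_solution A B →
    Spec_solution A B (solution A B)

-- ===== LEMMAS AND PROOFS =====

-- A's inner loop returns True iff no position matches at this shift
lemma pvA_inner_eq_true_iff (A B : List Int) (N n : Int) (l : List Int) :
    pvA_inner A B N n l = true ↔
      ∀ i ∈ l, PySem.List.pyGetD A i 0 ≠ PySem.List.pyGetD B (PySem.Int.mod (i - n + N) N) 0 := by
  induction l with
  | nil => simp [pvA_inner]
  | cons i rest ih =>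
    by_cases h : PySem.List.pyGetD A i 0 = PySem.List.pyGetD B (PySem.Int.mod (i - n + N) N) 0 <;>
      simp [pvA_inner, h, ih]

-- the value→positions index: membership characterisation
lemma mem_pvB_pos_iff (B : List Int) (N : Int) (hN : 0 ≤ N) (hNB : N ≤ (B.length : Int))
    (a j : Int) :
    j ∈ PySem.Dict.getD (pvB_pos B N) a [] ↔
      ∃ k : Nat, (k : Int) < N ∧ B.getD k 0 = a ∧ j = (k : Int) := by
  have hfold :
      (PySem.List.enumerate (PySem.List.slice B none (some N)) 0).foldl
          (fun d p => PySem.Dict.modify d p.2 [] (fun l => l ++ [p.1])) PySem.Dict.empty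
        = ((PySem.List.enumerate (PySem.List.slice B none (some N)) 0).map Prod.swap).foldl
          (fun d q => PySem.Dict.modify d q.1 [] (fun l => l ++ [q.2])) PySem.Dict.empty := by
    rw [List.foldl_map]; rfl
  unfold pvB_pos
  rw [hfold, PySem.Dict.getD_foldl_modify_append, PySem.Dict.getD_empty]
  have hs : PySem.List.slice B none (some N) = B.take N.toNat := PySem.List.slice_to B hN
  have hslen : (B.take N.toNat).length = N.toNat := by
    simp [List.length_take]
    omega
  simp only [List.nil_append, List.mem_map, List.mem_filter, List.mem_map, hs]
  constructor
  · rintro ⟨p, ⟨⟨q, hq, rfl⟩, ha⟩, rfl⟩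
    rcases (PySem.List.mem_enumerate_iff _ _ _).1 hq with ⟨k, hk, rfl⟩
    refine ⟨k, by omega, ?_, by simp [Prod.swap]⟩
    have hkB : k < B.length := by omega
    have : (B.take N.toNat)[k] = B[k] := List.getElem_take
    simp only [Prod.swap] at ha
    simp only [beq_iff_eq] at ha
    rw [List.getD_eq_getElem _ _ hkB, ← this, ← ha]
  · rintro ⟨k, hkN, hBa, rfl⟩
    have hkB : k < B.length := by omega
    have hks : k < (B.take N.toNat).length := by omega
    refine ⟨((0 : Int) + k, (B.take N.toNat)[k]).swap, ⟨⟨_, ?_, rfl⟩, ?_⟩, by simp⟩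
    · exact (PySem.List.mem_enumerate_iff _ _ _).2 ⟨k, hks, rfl⟩
    · have hBk : B[k] = a := by rw [List.getD_eq_getElem _ _ hkB] at hBa; exact hBa
      have : (B.take N.toNat)[k] = B[k] := List.getElem_take
      simp [Prod.swap, this, hBk]

-- nested fold of per-element folds = one fold over the flattened list
lemma foldl_foldl_flatMap {α β γ : Type} (f : α → List β) (g : γ → β → γ)
    (l : List α) (init : γ) :
    l.foldl (fun acc x => (f x).foldl g acc) init = (l.flatMap f).foldl g init := by
  induction l generalizing init with
  | nil => rfl
  | cons x t ih => simp [List.flatMap_cons, List.foldl_append, ih]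

-- a fold of set-True operations: a cell is true iff it started true or its index occurs
lemma getD_foldl_pySetD (ks : List Int) (bd : List Bool) (m : Nat) (hm : m < bd.length)
    (hks : ∀ k ∈ ks, 0 ≤ k) :
    (ks.foldl (fun b2 k => PySem.List.pySetD b2 k true) bd).getD m false
      = (bd.getD m false || decide ((m : Int) ∈ ks)) := by
  induction ks generalizing bd with
  | nil => simp
  | cons k t ih =>
    have hk0 : 0 ≤ k := hks k (by simp)
    have hset : PySem.List.pySetD bd k true = bd.set k.toNat true :=
      PySem.List.pySetD_of_nonneg bd true hk0
    have hlen : (PySem.List.pySetD bd k true).length = bd.length :=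
      PySem.List.length_pySetD bd k true
    rw [List.foldl_cons, ih _ (by omega) (fun x hx => hks x (by simp [hx]))]
    by_cases hmk : (m : Int) = k
    · have hmk' : k.toNat = m := by omega
      rw [hset, hmk']
      simp [List.getD_eq_getElem?_getD, hm, hmk]
    · have hmk' : m ≠ k.toNat := by omega
      rw [hset]
      simp [List.getD_eq_getElem?_getD, Ne.symm hmk', hmk]

-- x % N = y whenever x differs from y ∈ [0,N) by a multiple of N
lemma emod_eq_of_shift (x y N k : Int) (hy0 : 0 ≤ y) (hyN : y < N) (h : x = y + N * k) :
    x % N = y := by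
  subst h
  rw [Int.add_mul_emod_self_left]
  exact Int.emod_eq_of_lt hy0 hyN

-- the two ways of naming the matching pair (i,j) of a shift n agree
lemma mod_shift_iff (N i j n : Int) (hN : 0 < N) (hj : 0 ≤ j) (hjN : j < N)
    (hn : 0 ≤ n) (hnN : n < N) :
    PySem.Int.mod (i - j) N = n ↔ PySem.Int.mod (i - n + N) N = j := by
  rw [PySem.Int.mod_eq_emod_of_pos hN, PySem.Int.mod_eq_emod_of_pos hN]
  constructor
  · intro h
    have hdecomp : (i - j) % N + N * ((i - j) / N) = i - j := Int.emod_add_mul_ediv ..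
    exact emod_eq_of_shift _ _ _ ((i - j) / N + 1) hj hjN (by rw [h] at hdecomp; ring_nf; omega)
  · intro h
    have hdecomp : (i - n + N) % N + N * ((i - n + N) / N) = i - n + N := Int.emod_add_mul_ediv ..
    exact emod_eq_of_shift _ _ _ ((i - n + N) / N - 1) hn hnN (by rw [h] at hdecomp; ring_nf; omega)

-- characterisation of the bad-shift table
lemma pvB_bad_getD_iff (A B : List Int) (hNB : A.length ≤ B.length) (m : Nat)
    (hm : m < A.length) :
    (pvB_bad A B (A.length : Int)).getD m false = true ↔
      ∃ i j : Nat, i < A.length ∧ j < A.length ∧ A.getD i 0 = B.getD j 0 ∧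
        PySem.Int.mod ((i : Int) - (j : Int)) (A.length : Int) = (m : Int) := by
  have hN : (0 : Int) < (A.length : Int) := by omega
  unfold pvB_bad
  have hfuns : (fun (bd : List Bool) (p : Int × Int) =>
      (PySem.Dict.getD (pvB_pos B (A.length : Int)) p.2 []).foldl
        (fun b2 j => PySem.List.pySetD b2 (PySem.Int.mod (p.1 - j) (A.length : Int)) true) bd)
      = (fun bd p =>
        ((PySem.Dict.getD (pvB_pos B (A.length : Int)) p.2 []).map
            (fun j => PySem.Int.mod (p.1 - j) (A.length : Int))).foldl
          (fun b2 k => PySem.List.pySetD b2 k true) bd) := by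
    funext bd p; rw [List.foldl_map]
  rw [hfuns, foldl_foldl_flatMap]
  rw [getD_foldl_pySetD _ _ m (by simp; omega) ?nonneg]
  case nonneg =>
    intro k hk
    simp only [List.mem_flatMap, List.mem_map] at hk
    obtain ⟨p, _, j, _, rfl⟩ := hk
    exact PySem.Int.mod_nonneg _ hN
  rw [List.getD_replicate false (by omega)]
  simp only [Bool.false_or, decide_eq_true_eq, List.mem_flatMap, List.mem_map]
  constructor
  · rintro ⟨p, hp, j, hj, hmod⟩
    rcases (PySem.List.mem_enumerate_iff _ _ _).1 hp with ⟨i, hi, rfl⟩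
    rcases (mem_pvB_pos_iff B _ (by omega) (by exact_mod_cast hNB) _ _).1 hj
      with ⟨k, hkN, hBk, rfl⟩
    refine ⟨i, k, hi, by omega, ?_, ?_⟩
    · rw [List.getD_eq_getElem _ _ hi, hBk]
    · simpa using hmod
  · rintro ⟨i, j, hi, hj, hAB, hmod⟩
    refine ⟨((0 : Int) + i, A[i]), (PySem.List.mem_enumerate_iff _ _ _).2 ⟨i, hi, rfl⟩,
      (j : Int), ?_, by simpa using hmod⟩
    refine (mem_pvB_pos_iff B _ (by omega) (by exact_mod_cast hNB) _ _).2
      ⟨j, by omega, ?_, rfl⟩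
    rw [← hAB, List.getD_eq_getElem _ _ hi]

-- the two scans agree pointwise, hence return the same first index
lemma scan_congr (A B : List Int) (N : Int) (bad : List Bool) (l : List Int)
    (h : ∀ n ∈ l, (pvA_inner A B N n (PySem.List.pyRange 0 N 1) = true ↔
        PySem.List.pyGetD bad n false = false)) :
    pvA_outer A B N l = pvB_scan bad l := by
  induction l with
  | nil => rfl
  | cons n rest ih =>
    have hn := h n (by simp)
    by_cases hA : pvA_inner A B N n (PySem.List.pyRange 0 N 1) = true
    · simp [pvA_outer, pvB_scan, hA, hn.1 hA]
    · have hbad : PySem.List.pyGetD bad n false = true := by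
        rcases Bool.eq_false_or_eq_true (PySem.List.pyGetD bad n false) with h' | h'
        · exact h'
        · exact absurd (hn.2 h') hA
      simp [pvA_outer, pvB_scan, hA, hbad, ih (fun x hx => h x (by simp [hx]))]

-- ===== VERDICT (by name: the statement is the Claim_ definition above) =====
theorem solution_spec : Claim_equal_solution := by
  intro A B _hdom hpre
  unfold Spec_solution solution solution_alt
  apply scan_congr
  intro n hn
  rcases PySem.List.mem_pyRange_one.1 hn with ⟨hn0, hnN⟩
  have hN : (0 : Int) < (A.length : Int) := lt_of_le_of_lt hn0 hnN
  have hm : n.toNat < A.length := by omega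
  have hNB : A.length ≤ B.length := hpre
  rw [pvA_inner_eq_true_iff,
    PySem.List.pyGetD_of_nonneg (pvB_bad A B (A.length : Int)) false hn0]
  rw [← Bool.not_eq_true (List.getD _ _ _), ← not_iff_not, not_not, not_forall,
    pvB_bad_getD_iff A B hNB n.toNat hm]
  constructor
  · rintro ⟨i, hi⟩
    simp only [PySem.List.mem_pyRange_one, Classical.not_imp, not_not] at hi
    obtain ⟨⟨hi0, hiN⟩, heq⟩ := hi
    set jI := PySem.Int.mod (i - n + (A.length : Int)) (A.length : Int) with hjI
    have hj0 : 0 ≤ jI := PySem.Int.mod_nonneg _ hN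
    have hjN : jI < (A.length : Int) := PySem.Int.mod_lt _ hN
    have hmodn : PySem.Int.mod (i - jI) (A.length : Int) = n :=
      (mod_shift_iff _ i jI n hN hj0 hjN hn0 hnN).2 rfl
    refine ⟨i.toNat, jI.toNat, by omega, by omega, ?_, ?_⟩
    · have h1 : PySem.List.pyGetD A i 0 = A.getD i.toNat 0 :=
        PySem.List.pyGetD_of_nonneg A 0 hi0
      have h2 : PySem.List.pyGetD B jI 0 = B.getD jI.toNat 0 :=
        PySem.List.pyGetD_of_nonneg B 0 hj0
      rw [← h1, ← h2, heq]
    · have : ((i.toNat : Int)) = i := by omega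
      have hj' : ((jI.toNat : Int)) = jI := by omega
      rw [this, hj', hmodn]; omega
  · rintro ⟨i, j, hi, hj, hAB, hmod⟩
    have hjN : ((j : Int)) < (A.length : Int) := by exact_mod_cast hj
    have hmodn : PySem.Int.mod ((i : Int) - (j : Int)) (A.length : Int) = n := by
      rw [hmod]; omega
    have hshift : PySem.Int.mod ((i : Int) - n + (A.length : Int)) (A.length : Int) = (j : Int) :=
      (mod_shift_iff _ _ _ _ hN (by omega) hjN hn0 hnN).1 hmodn
    refine ⟨(i : Int), ?_⟩
    simp only [PySem.List.mem_pyRange_one, Classical.not_imp, not_not]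
    refine ⟨⟨by omega, by exact_mod_cast hi⟩, ?_⟩
    rw [hshift]
    simpa using hAB
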